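-- pv_equiv track=rewrite | github.com/0thbit/algo_ds | remove_alternate_char.py | remove_alternate_char
-- ===== SOURCE A (Python) =====
-- from collections import defaultdict
--
-- def remove_alternate_char(inp_str):
--     """ Takes in a string as an input and returns a string removing alternate characters """
--
--     seen_before = defaultdict(bool)
--     new_str = []
--
--     for c in inp_str:
--         if seen_before[c]:  # skip add c to new_str
--             seen_before[c] = False
--         else:
--             new_str.append(c)
--             seen_before[c] = True
--
--     return "".join(new_str)
-- ===== SOURCE B (Python) =====
-- def remove_alternate_char(inp_str):
--     """ Takes in a string as an input and returns a string removing alternate characters """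
--     positions = {}
--     for i, c in enumerate(inp_str):
--         positions.setdefault(c, []).append(i)
--     keep = set()
--     for idxs in positions.values():
--         keep.update(p for k, p in enumerate(idxs) if k % 2 == 0)
--     return "".join(inp_str[i] for i in sorted(keep))
-- ===== Notes on version B (the rewrite author's own statement) =====
-- stated objective: alternative
-- what changed: Replaces the single toggling pass by a staged index-grouping approach: build a dict from each character to its occurrence positions, keep the even-ranked position of every character's occurrence list, and rebuild the string from the sorted kept positions.
import Mathlib
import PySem

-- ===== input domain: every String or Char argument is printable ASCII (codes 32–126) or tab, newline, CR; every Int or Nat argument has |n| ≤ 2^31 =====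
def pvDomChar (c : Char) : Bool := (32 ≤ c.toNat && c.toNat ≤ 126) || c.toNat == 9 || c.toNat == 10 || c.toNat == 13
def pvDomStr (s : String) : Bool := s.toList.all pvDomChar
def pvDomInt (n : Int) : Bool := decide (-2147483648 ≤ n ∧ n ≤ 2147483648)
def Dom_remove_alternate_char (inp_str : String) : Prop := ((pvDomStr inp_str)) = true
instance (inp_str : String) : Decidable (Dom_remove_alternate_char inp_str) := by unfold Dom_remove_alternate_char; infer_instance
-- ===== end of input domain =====

-- B replaces A's toggling single pass by a staged grouping: a dict char → occurrence
-- positions, even-ranked positions kept per character, string rebuilt from the sorted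
-- kept positions (alternative algorithm, not faster).


-- ===== PORT A =====
def remove_alternate_char (inp_str : String) : String :=
  let r := inp_str.toList.foldl
    (fun (st : PySem.Dict Char Bool × List Char) c =>
      if st.1.getD c false then (st.1.insert c false, st.2)
      else (st.1.insert c true, st.2 ++ [c]))
    (PySem.Dict.empty, [])
  String.ofList r.2

-- ===== PORT B =====
def remove_alternate_char_alt (inp_str : String) : String :=
  let chars := inp_str.toList
  let positions := (PySem.List.enumerate chars 0).foldl
    (fun (d : PySem.Dict Char (List Int)) ic => d.modify ic.2 [] (fun v => v ++ [ic.1]))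
    PySem.Dict.empty
  let keep := positions.values.foldl
    (fun (s : PySem.Set Int) idxs =>
      PySem.Set.update s (((PySem.List.enumerate idxs 0).filter
        (fun kp => PySem.Int.mod kp.1 2 == 0)).map (·.2)))
    PySem.Set.empty
  -- pyGet? never returns none here (every kept index arose from enumerate(chars)), so filterMap is exact
  String.ofList ((PySem.List.sorted keep (fun x => x) false).filterMap
    (fun i => PySem.List.pyGet? chars i))

-- ===== PRECONDITION & SPEC =====
def Spec_remove_alternate_char (inp_str : String) (out : String) : Prop := out = remove_alternate_char_alt inp_str
instance (inp_str : String) (out : String) : Decidable (Spec_remove_alternate_char inp_str out) := by unfold Spec_remove_alternate_char; infer_instance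

-- ===== CLAIM (what is proved, stated in full; the proofs are below) =====
def Claim_equal_remove_alternate_char : Prop := ∀ (inp_str : String), Dom_remove_alternate_char inp_str → Spec_remove_alternate_char inp_str (remove_alternate_char inp_str)

-- ===== LEMMAS AND PROOFS =====

-- the common reference: process l after prefix p, keep c iff p has seen c an even number of times
def pvKeep (p l : List Char) : List Char :=
  match l with
  | [] => []
  | c :: t => if p.count c % 2 = 0 then c :: pvKeep (p ++ [c]) t else pvKeep (p ++ [c]) t

-- the kept (index, char) pairs: even count of the char in the strict prefix
def pvF (l : List Char) : List (Int × Char) :=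
  (PySem.List.enumerate l 0).filter
    (fun ic => (PySem.List.slice l none (some ic.1)).count ic.2 % 2 == 0)

-- occurrence positions of c in l
def pvOcc (l : List Char) (c : Char) : List Int :=
  ((PySem.List.enumerate l 0).filter (fun ic => ic.2 == c)).map (·.1)

-- even-ranked elements, exactly as B's comprehension computes them
def pvEvens (xs : List Int) : List Int :=
  ((PySem.List.enumerate xs 0).filter (fun kp => PySem.Int.mod kp.1 2 == 0)).map (·.2)

lemma pvA_loop (l p : List Char) (d : PySem.Dict Char Bool) (acc : List Char)
    (hd : ∀ c, d.getD c false = decide (p.count c % 2 = 1)) :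
    (l.foldl
      (fun (st : PySem.Dict Char Bool × List Char) c =>
        if st.1.getD c false then (st.1.insert c false, st.2)
        else (st.1.insert c true, st.2 ++ [c]))
      (d, acc)).2 = acc ++ pvKeep p l := by
  induction l generalizing p d acc with
  | nil => simp [pvKeep]
  | cons c t ih =>
    simp only [List.foldl_cons]
    rcases Nat.mod_two_eq_zero_or_one (p.count c) with h0 | h1
    · have hg : d.getD c false = false := by rw [hd c]; simp [h0]
      rw [show (if d.getD c false then (d.insert c false, acc)
          else (d.insert c true, acc ++ [c])) = (d.insert c true, acc ++ [c]) by simp [hg]]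
      rw [ih (p ++ [c]) _ _ ?_]
      · simp [pvKeep, h0]
      · intro x
        rw [PySem.Dict.getD_insert]
        by_cases hx : x = c
        · subst hx; simp [List.count_append, Nat.add_mod, h0]
        · have hcx : ¬ c = x := fun h => hx h.symm
          simp [hx, hd x, List.count_append, hcx]
    · have hg : d.getD c false = true := by rw [hd c]; simp [h1]
      rw [show (if d.getD c false then (d.insert c false, acc)
          else (d.insert c true, acc ++ [c])) = (d.insert c false, acc) by simp [hg]]
      rw [ih (p ++ [c]) _ _ ?_]
      · simp [pvKeep, h1]
      · intro x
        rw [PySem.Dict.getD_insert]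
        by_cases hx : x = c
        · subst hx; simp [List.count_append, Nat.add_mod, h1]
        · have hcx : ¬ c = x := fun h => hx h.symm
          simp [hx, hd x, List.count_append, hcx]

lemma pvF_loop (l p full : List Char) (h : full = p ++ l) :
    ((PySem.List.enumerate l ((p.length : Int))).filter
      (fun ic => ((PySem.List.slice full none (some ic.1)).count ic.2 % 2 == 0))).map (·.2)
      = pvKeep p l := by
  induction l generalizing p with
  | nil => simp [pvKeep, PySem.List.enumerate]
  | cons c t ih =>
    subst h
    rw [PySem.List.enumerate_cons]
    have hsl : PySem.List.slice (p ++ c :: t) none (some ((p.length : Int))) = p := by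
      rw [PySem.List.slice_to_natCast]
      exact List.take_left
    have htl := ih (p := p ++ [c]) (by simp)
    have hlen : (p.length : Int) + 1 = (((p ++ [c]).length : Nat) : Int) := by simp
    rcases Nat.mod_two_eq_zero_or_one (p.count c) with h0 | h1
    · rw [List.filter_cons_of_pos (by simp [hsl, h0])]
      simp only [List.map_cons]
      rw [hlen, htl]
      simp [pvKeep, h0]
    · rw [List.filter_cons_of_neg (by simp [hsl, h1])]
      rw [hlen, htl]
      simp [pvKeep, h1]

lemma pvF_chars (l : List Char) : (pvF l).map (·.2) = pvKeep [] l := by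
  have := pvF_loop l [] l (by simp)
  simpa [pvF] using this

lemma pvMem_F (l : List Char) (p : Int × Char) :
    p ∈ pvF l ↔ ∃ (j : Nat) (_ : j < l.length),
      p = ((j : Int), l[j]) ∧ (l.take j).count l[j] % 2 = 0 := by
  unfold pvF
  rw [List.mem_filter]
  constructor
  · rintro ⟨hmem, hpred⟩
    rcases (PySem.List.mem_enumerate_iff l 0 p).1 hmem with ⟨j, hj, rfl⟩
    refine ⟨j, hj, by simp, ?_⟩
    simpa using hpred
  · rintro ⟨j, hj, rfl, hcnt⟩
    refine ⟨(PySem.List.mem_enumerate_iff l 0 _).2 ⟨j, hj, by simp⟩, ?_⟩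
    simp [PySem.List.slice_to_natCast, hcnt]

lemma pvLen_occ_aux (l : List Char) (c : Char) : ∀ s : Int,
    ((PySem.List.enumerate l s).filter (fun ic => ic.2 == c)).length = l.count c := by
  induction l with
  | nil => intro s; simp [PySem.List.enumerate]
  | cons a t ih =>
    intro s
    rw [PySem.List.enumerate_cons]
    by_cases h : a = c
    · subst h; simp [ih]
    · have hne : ¬ (a == c) = true := by simp [h]
      simp [hne, h, ih]

lemma pvLen_occ (l : List Char) (c : Char) : (pvOcc l c).length = l.count c := by
  simp [pvOcc, pvLen_occ_aux]

lemma pvOcc_append (l : List Char) (a c : Char) :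
    pvOcc (l ++ [a]) c = pvOcc l c ++ (if a = c then [((l.length : Nat) : Int)] else []) := by
  unfold pvOcc
  rw [PySem.List.enumerate_append]
  simp only [List.filter_append, List.map_append]
  congr 1
  by_cases h : a = c <;> simp [PySem.List.enumerate, h]

lemma pvEvens_append_singleton (xs : List Int) (y : Int) :
    pvEvens (xs ++ [y]) = pvEvens xs ++ (if xs.length % 2 = 0 then [y] else []) := by
  unfold pvEvens
  rw [PySem.List.enumerate_append]
  have hb : (PySem.Int.mod (0 + (xs.length : Int)) 2 == (0 : Int)) = decide (xs.length % 2 = 0) := by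
    rw [Bool.eq_iff_iff]
    simp [PySem.Int.mod, Int.fmod_eq_emod]
    omega
  have he : PySem.List.enumerate [y] (0 + (xs.length : Int)) = [(0 + (xs.length : Int), y)] := by
    simp [PySem.List.enumerate]
  rw [List.filter_append, List.map_append, he]
  congr 1
  simp only [List.filter_singleton, hb]
  by_cases h : xs.length % 2 = 0 <;> simp [h]

lemma pvF_append (l : List Char) (a : Char) :
    pvF (l ++ [a]) = pvF l ++ (if l.count a % 2 = 0 then [(((l.length : Nat) : Int), a)] else []) := by
  unfold pvF
  rw [PySem.List.enumerate_append]
  simp only [List.filter_append]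
  congr 1
  · apply List.filter_congr
    intro p hp
    rcases (PySem.List.mem_enumerate_iff l 0 p).1 hp with ⟨j, hj, rfl⟩
    simp only [PySem.List.slice_to_natCast, Int.zero_add]
    rw [List.take_append_of_le_length (by omega)]
  · have hsl : PySem.List.slice (l ++ [a]) none (some ((l.length : Nat) : Int)) = l := by
      rw [PySem.List.slice_to_natCast]
      exact List.take_left
    by_cases h : l.count a % 2 = 0 <;>
      simp [PySem.List.enumerate, hsl, h]

lemma pvEO (l : List Char) (c : Char) :
    pvEvens (pvOcc l c) = ((pvF l).filter (fun p => p.2 == c)).map (·.1) := by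
  induction l using List.reverseRecOn with
  | nil => simp [pvEvens, pvOcc, pvF, PySem.List.enumerate]
  | append_singleton l a ih =>
    rw [pvOcc_append, pvF_append]
    by_cases hac : a = c
    · subst hac
      rw [if_pos rfl, pvEvens_append_singleton, pvLen_occ, ih,
        List.filter_append, List.map_append]
      congr 1
      by_cases h : l.count a % 2 = 0 <;> simp [h]
    · rw [if_neg hac, List.append_nil, ih, List.filter_append, List.map_append]
      by_cases h : l.count a % 2 = 0 <;> simp [h, hac]

lemma pvKeepFold_mem (vs : List (List Int)) (s0 : PySem.Set Int) (i : Int) :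
    i ∈ vs.foldl (fun s idxs => PySem.Set.update s (pvEvens idxs)) s0 ↔
      i ∈ s0 ∨ ∃ v ∈ vs, i ∈ pvEvens v := by
  induction vs generalizing s0 with
  | nil => simp
  | cons v t ih =>
    simp only [List.foldl_cons, ih, PySem.Set.mem_update, List.mem_cons]
    constructor
    · rintro ((h | h) | ⟨w, hw, hi⟩)
      · exact Or.inl h
      · exact Or.inr ⟨v, Or.inl rfl, h⟩
      · exact Or.inr ⟨w, Or.inr hw, hi⟩
    · rintro (h | ⟨w, (rfl | hw), hi⟩)
      · exact Or.inl (Or.inl h)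
      · exact Or.inl (Or.inr hi)
      · exact Or.inr ⟨w, hw, hi⟩

lemma pvKeepFold_nodup (vs : List (List Int)) (s0 : PySem.Set Int) (h : s0.Nodup) :
    (vs.foldl (fun s idxs => PySem.Set.update s (pvEvens idxs)) s0).Nodup := by
  induction vs generalizing s0 with
  | nil => exact h
  | cons v t ih => exact ih _ (PySem.Set.nodup_update _ _ h)

lemma pvKidx_pairwise (l : List Char) : ((pvF l).map (·.1)).Pairwise (· < ·) := by
  have h := PySem.List.pairwise_lt_enumerate l 0
  exact (List.pairwise_map).2 (h.filter _)

lemma pvMem_keepIdx (l : List Char) (i : Int) :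
    (∃ c ∈ l, i ∈ pvEvens (pvOcc l c)) ↔ i ∈ (pvF l).map (·.1) := by
  constructor
  · rintro ⟨c, _, hi⟩
    rw [pvEO] at hi
    rcases List.mem_map.1 hi with ⟨p, hp, rfl⟩
    exact List.mem_map.2 ⟨p, (List.mem_filter.1 hp).1, rfl⟩
  · rintro hi
    rcases List.mem_map.1 hi with ⟨p, hp, rfl⟩
    rcases (pvMem_F l p).1 hp with ⟨j, hj, hpe, _⟩
    refine ⟨p.2, by rw [hpe]; exact List.getElem_mem hj, ?_⟩
    rw [pvEO]
    exact List.mem_map.2 ⟨p, List.mem_filter.2 ⟨hp, by simp⟩, rfl⟩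

lemma pvFilterMap_eq_map {α β : Type} (xs : List α) (g : α → Option β) (f : α → β)
    (h : ∀ x ∈ xs, g x = some (f x)) : xs.filterMap g = xs.map f := by
  induction xs with
  | nil => rfl
  | cons x t ih =>
    rw [List.filterMap_cons, h x (by simp), List.map_cons,
      ih (fun y hy => h y (by simp [hy]))]

-- ===== VERDICT (by name: the statement is the Claim_ definition above) =====
theorem remove_alternate_char_spec : Claim_equal_remove_alternate_char := by
  intro s _
  unfold Spec_remove_alternate_char remove_alternate_char remove_alternate_char_alt
  set l := s.toList with hl
  -- A's side
  have hA := pvA_loop l [] PySem.Dict.empty [] (by intro c; simp [PySem.Dict.getD])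
  simp only [hA, List.nil_append]
  -- B's dict
  set positions := (PySem.List.enumerate l 0).foldl
    (fun (d : PySem.Dict Char (List Int)) ic => d.modify ic.2 [] (fun v => v ++ [ic.1]))
    PySem.Dict.empty with hpos
  have hfold : positions = ((PySem.List.enumerate l 0).map (fun ic => (ic.2, ic.1))).foldl
      (fun (d : PySem.Dict Char (List Int)) p => d.modify p.1 [] (fun v => v ++ [p.2]))
      PySem.Dict.empty := by
    rw [List.foldl_map]
  have hgetD : ∀ c : Char, positions.getD c [] = pvOcc l c := by
    intro c
    rw [hfold, PySem.Dict.getD_foldl_modify_append]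
    simp only [PySem.Dict.getD_empty, List.nil_append, List.filter_map, List.map_map]
    rfl
  have hkeys : positions.keys = PySem.Set.ofList l := by
    rw [hpos, PySem.Dict.keys_foldl_modify_key]
    simp [PySem.Dict.keys, PySem.Dict.empty, PySem.Set.update_nil_left,
      PySem.List.map_snd_enumerate]
  have hnodup : positions.keys.Nodup := by
    rw [hkeys]; exact PySem.Set.nodup_ofList l
  have hvals : positions.values = (PySem.Set.ofList l).map (fun c => pvOcc l c) := by
    rw [PySem.Dict.values_eq_map_keys positions hnodup [], hkeys]
    exact List.map_congr_left (fun c _ => hgetD c)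
  -- B's keep set
  set keep := positions.values.foldl
    (fun (t : PySem.Set Int) idxs =>
      PySem.Set.update t (((PySem.List.enumerate idxs 0).filter
        (fun kp => PySem.Int.mod kp.1 2 == 0)).map (·.2)))
    PySem.Set.empty with hkeep
  have hkeep' : keep = positions.values.foldl
      (fun t idxs => PySem.Set.update t (pvEvens idxs)) PySem.Set.empty := rfl
  have hmemk : ∀ i : Int, i ∈ keep ↔ i ∈ (pvF l).map (·.1) := by
    intro i
    rw [hkeep', pvKeepFold_mem, hvals]
    constructor
    · rintro (h | ⟨v, hv, hi⟩)
      · cases h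
      · rcases List.mem_map.1 hv with ⟨c, hc, rfl⟩
        exact (pvMem_keepIdx l i).1 ⟨c, by simpa using hc, hi⟩
    · intro h
      rcases (pvMem_keepIdx l i).2 h with ⟨c, hc, hi⟩
      exact Or.inr ⟨pvOcc l c, List.mem_map.2 ⟨c, by simpa using hc, rfl⟩, hi⟩
  have hknodup : keep.Nodup := by
    rw [hkeep']; exact pvKeepFold_nodup _ _ (by simp [PySem.Set.empty])
  have hKpw := pvKidx_pairwise l
  have hKnodup : ((pvF l).map (·.1)).Nodup := hKpw.imp (fun h => ne_of_lt h)
  have hperm : ((pvF l).map (·.1)).Perm keep :=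
    (List.perm_ext_iff_of_nodup hKnodup hknodup).2 (fun i => (hmemk i).symm)
  have hsorted : PySem.List.sorted keep (fun x => x) false = (pvF l).map (·.1) := by
    exact PySem.List.sorted_eq_of_perm_of_pairwise_lt keep _ (fun x => x) hperm hKpw
  rw [hsorted]
  have hfm : ((pvF l).map (·.1)).filterMap (fun i => PySem.List.pyGet? l i)
      = (pvF l).map (·.2) := by
    rw [List.filterMap_map]
    apply pvFilterMap_eq_map
    intro p hp
    rcases (pvMem_F l p).1 hp with ⟨j, hj, hpe, _⟩
    rw [hpe]
    simp [hj]
  rw [hfm, pvF_chars]
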